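-- pv_equiv track=rewrite | github.com/Beatheru/PythonCollection | pythonProject/FantasyGameInventory.py | addToInventory
-- ===== SOURCE A (Python) =====
-- def addToInventory(inv, addedItems):
--     newInv = inv
--     for item in addedItems:
--         if item in inv.keys():
--             newInv[item] = newInv[item] + 1
--         else:
--             newInv[item] = 1
--
--     return newInv
-- ===== SOURCE B (Python) =====
-- def addToInventory(inv, addedItems):
--     counts = {}
--     for item in addedItems:
--         counts[item] = counts.get(item, 0) + 1
--     for k, n in counts.items():
--         inv[k] = inv.get(k, 0) + n
--     return inv
-- ===== Notes on version B (the rewrite author's own statement) =====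
-- stated objective: alternative
-- what changed: B first builds a frequency table of addedItems in one pass, then merges each distinct item's tally into inv, instead of A's per-element increment loop.
import Mathlib
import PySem

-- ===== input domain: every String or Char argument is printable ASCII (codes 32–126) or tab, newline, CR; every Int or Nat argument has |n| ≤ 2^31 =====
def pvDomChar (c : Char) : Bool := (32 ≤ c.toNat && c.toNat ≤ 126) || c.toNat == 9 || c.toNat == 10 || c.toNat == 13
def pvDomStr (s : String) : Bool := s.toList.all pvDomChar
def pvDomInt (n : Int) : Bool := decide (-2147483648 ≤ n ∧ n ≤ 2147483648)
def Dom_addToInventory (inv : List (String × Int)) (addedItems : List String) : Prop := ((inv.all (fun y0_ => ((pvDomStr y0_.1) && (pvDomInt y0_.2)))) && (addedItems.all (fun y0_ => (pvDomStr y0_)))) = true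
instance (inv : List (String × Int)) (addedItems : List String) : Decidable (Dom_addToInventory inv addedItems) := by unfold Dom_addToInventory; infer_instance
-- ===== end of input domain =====

-- B counts addedItems into a frequency dict first, then merges the distinct tallies into inv
-- (alternative decomposition, same cost; both A and B mutate the dict passed as inv in Python —
-- equivalence proved here is about the returned association list).

-- ===== PORT A =====
-- per-element loop: increment if present, else set to 1
def addToInventory (inv : List (String × Int)) (addedItems : List String) : List (String × Int) :=
  (addedItems.foldl
    (fun d item =>
      if d.contains item then d.insert item (d.getD item 0 + 1)
      else d.insert item 1)
    (PySem.Dict.ofList inv)).items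

-- ===== PORT B =====
def addToInventory_alt (inv : List (String × Int)) (addedItems : List String) : List (String × Int) :=
  let counts := addedItems.foldl (fun d x => d.insert x (d.getD x 0 + 1)) PySem.Dict.empty
  (counts.items.foldl
    (fun d (p : String × Int) => d.insert p.1 (d.getD p.1 0 + p.2))
    (PySem.Dict.ofList inv)).items

-- ===== PRECONDITION & SPEC =====
def Spec_addToInventory (inv : List (String × Int)) (addedItems : List String) (out : List (String × Int)) : Prop := out = addToInventory_alt inv addedItems
instance (inv : List (String × Int)) (addedItems : List String) (out : List (String × Int)) : Decidable (Spec_addToInventory inv addedItems out) := by unfold Spec_addToInventory; infer_instance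

-- ===== CLAIM (what is proved, stated in full; the proofs are below) =====
def Claim_equal_addToInventory : Prop := ∀ (inv : List (String × Int)) (addedItems : List String), Dom_addToInventory inv addedItems → Spec_addToInventory inv addedItems (addToInventory inv addedItems)

-- ===== LEMMAS AND PROOFS =====

theorem foldl_merge_items (ks : List String) (c : String → Int) (d : PySem.Dict String Int)
    (hnd : d.keys.Nodup) (hks : ks.Nodup) :
    (ks.foldl (fun d k => d.insert k (d.getD k 0 + c k)) d).items
    = d.items.map (fun p => if p.1 ∈ ks then (p.1, p.2 + c p.1) else p)
      ++ (ks.filter (fun k => !(d.contains k))).map (fun k => (k, c k)) := by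
  induction ks generalizing d with
  | nil => simp
  | cons k ks ih =>
    rw [List.nodup_cons] at hks
    obtain ⟨hk, hks⟩ := hks
    rw [List.foldl_cons, ih _ (PySem.Dict.nodup_keys_insert _ _ _ hnd) hks]
    by_cases hc : d.contains k = true
    · rw [PySem.Dict.items_insert_of_contains _ _ hc, List.map_map, List.filter_cons_of_neg (by simp [hc])]
      congr 1
      · apply List.map_congr_left
        intro p hp
        by_cases hpk : p.1 = k
        · have hgd : d.getD k 0 = p.2 := by
            have : (k, p.2) ∈ d.items := by rw [← hpk]; exact hp
            exact PySem.Dict.getD_of_mem_items _ this hnd 0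
          simp [Function.comp, hpk, hk, hgd]
        · simp [Function.comp, hpk]
      · rw [List.filter_congr]
        intro k' hk'
        have : k' ≠ k := fun h => hk (h ▸ hk')
        simp [PySem.Dict.contains_insert, this]
    · rw [PySem.Dict.items_insert_of_not_contains _ _ (by simpa using hc),
          PySem.Dict.getD_of_not_contains _ _ (by simpa using hc), List.map_append,
          List.filter_cons_of_pos (by simp [hc])]
      have hmap : ∀ p ∈ d.items,
          (if p.1 ∈ ks then (p.1, p.2 + c p.1) else p)
          = (if p.1 ∈ k :: ks then (p.1, p.2 + c p.1) else p) := by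
        intro p hp
        have : p.1 ≠ k := by
          intro h
          exact hc ((PySem.Dict.contains_iff_mem_keys _ _).mpr (h ▸ PySem.Dict.mem_keys_of_mem_items _ hp))
        simp [List.mem_cons, this]
      have hfil : ∀ v : Int, List.filter (fun k' => !(d.insert k v).contains k') ks
          = List.filter (fun k => !d.contains k) ks := by
        intro v
        apply List.filter_congr
        intro k' hk'
        have : k' ≠ k := fun h => hk (h ▸ hk')
        simp [PySem.Dict.contains_insert, this]
      rw [List.map_congr_left hmap, hfil]
      simp [hk]

theorem filter_ins (l : List String) (d : PySem.Dict String Int) (x : String) (v : Int) :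
    List.filter (fun k => !(d.insert x v).contains k) (PySem.Set.ofList l)
    = List.filter (fun k => !d.contains k) (PySem.Set.discard (PySem.Set.ofList l) x) := by
  have hd : PySem.Set.discard (PySem.Set.ofList l) x
      = List.filter (fun y => !(y == x)) (PySem.Set.ofList l) := by
    simp [PySem.Set.discard]
  rw [hd, List.filter_filter]
  apply List.filter_congr
  intro k _
  simp only [PySem.Dict.contains_insert]
  cases (k == x) <;> cases d.contains k <;> simp

theorem foldl_count_items (l : List String) (d : PySem.Dict String Int) (hnd : d.keys.Nodup) :
    (l.foldl
      (fun d x => if d.contains x then d.insert x (d.getD x 0 + 1) else d.insert x 1) d).items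
    = d.items.map (fun p => (p.1, p.2 + (l.count p.1 : Int)))
      ++ ((PySem.Set.ofList l).filter (fun k => !(d.contains k))).map
          (fun k => (k, (l.count k : Int))) := by
  induction l generalizing d with
  | nil => simp
  | cons x l ih =>
    rw [List.foldl_cons]
    have hcnt : ∀ k : String, k ≠ x → (x :: l).count k = l.count k := by
      intro k hkx
      have : ¬ x = k := fun h => hkx (Eq.symm h)
      simp [this]
    have hdisc : ∀ k : String, k ∈ PySem.Set.discard (PySem.Set.ofList l) x → k ≠ x := by
      intro k hkm
      exact ((PySem.Set.mem_discard _ _ _).mp hkm).2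
    by_cases hc : d.contains x = true
    · rw [if_pos hc, ih _ (PySem.Dict.nodup_keys_insert _ _ _ hnd),
          PySem.Dict.items_insert_of_contains _ _ hc, List.map_map,
          PySem.Set.ofList_cons, List.filter_cons_of_neg (by simp [hc]), filter_ins]
      congr 1
      · apply List.map_congr_left
        intro p hp
        by_cases hpx : p.1 = x
        · have hgd : d.getD x 0 = p.2 := by
            have : (x, p.2) ∈ d.items := by rw [← hpx]; exact hp
            exact PySem.Dict.getD_of_mem_items _ this hnd 0
          simp only [Function.comp, hpx, beq_self_eq_true, if_pos, hgd]
          simp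
          ring
        · have h2 : (p.1 == x) = false := by simpa using hpx
          simp [Function.comp, h2, hcnt p.1 hpx]
      · apply List.map_congr_left
        intro k hkm
        rw [hcnt k (hdisc k (List.mem_of_mem_filter hkm))]
    · rw [if_neg hc, ih _ (PySem.Dict.nodup_keys_insert _ _ _ hnd),
          PySem.Dict.items_insert_of_not_contains _ _ (by simpa using hc), List.map_append,
          PySem.Set.ofList_cons, List.filter_cons_of_pos (by simp [hc]), filter_ins]
      have hmap : ∀ p ∈ d.items, ((p.1 : String), p.2 + (l.count p.1 : Int)) = (p.1, p.2 + ((x :: l).count p.1 : Int)) := by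
        intro p hp
        have hpx : p.1 ≠ x := by
          intro h
          exact hc ((PySem.Dict.contains_iff_mem_keys _ _).mpr (h ▸ PySem.Dict.mem_keys_of_mem_items _ hp))
        rw [hcnt p.1 hpx]
      rw [List.map_congr_left hmap]
      have hrest : ∀ k ∈ List.filter (fun k => !d.contains k) (PySem.Set.discard (PySem.Set.ofList l) x),
          ((k : String), ((l.count k : Int))) = (k, ((x :: l).count k : Int)) := by
        intro k hkm
        rw [hcnt k (hdisc k (List.mem_of_mem_filter hkm))]
      rw [List.map_congr_left hrest]
      simp only [List.map_cons, List.map_nil, List.append_assoc, List.cons_append, List.nil_append]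
      congr 2
      simp
      ring

-- B-side : merging Counter(addedItems) into d item-by-item gives the same items as A's per-element loop target
theorem counter_merge_items (l : List String) (d : PySem.Dict String Int) (hnd : d.keys.Nodup) :
    (((l.foldl (fun d x => d.insert x (d.getD x 0 + 1)) PySem.Dict.empty).items).foldl
      (fun d (p : String × Int) => d.insert p.1 (d.getD p.1 0 + p.2)) d).items
    = d.items.map (fun p => (p.1, p.2 + (l.count p.1 : Int)))
      ++ ((PySem.Set.ofList l).filter (fun k => !(d.contains k))).map
          (fun k => (k, (l.count k : Int))) := by
  rw [PySem.Dict.foldl_insert_getD_add_one_eq_counter, PySem.Dict.items_counter, List.foldl_map,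
      foldl_merge_items _ _ _ hnd (PySem.Set.nodup_ofList l)]
  congr 1
  apply List.map_congr_left
  intro p hp
  by_cases h : p.1 ∈ l
  · simp [PySem.Set.mem_ofList, h]
  · simp [PySem.Set.mem_ofList, h, List.count_eq_zero_of_not_mem h]

-- ===== VERDICT (by name: the statement is the Claim_ definition above) =====
theorem addToInventory_spec : Claim_equal_addToInventory := by
  intro inv addedItems _
  unfold Spec_addToInventory addToInventory addToInventory_alt
  rw [foldl_count_items _ _ (PySem.Dict.nodup_keys_ofList inv),
      counter_merge_items _ _ (PySem.Dict.nodup_keys_ofList inv)]
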